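-- pv_equiv track=rewrite | github.com/NazikXY/PBot | main.py | make_pairlist_from_list
-- ===== SOURCE A (Python) =====
-- def make_pairlist_from_list(gl):
--     f = []
--     s = []
--     flag = 0
--     res = []
--     for i in gl:
--         if flag:
--             f.append(i)
--             flag = 0
--         else:
--             s.append(i)
--             flag = 1
--     while True:
--         if len(f) + len(s) <= 0:
--             break
--         tmp = []
--         if len(f) > 0:
--             tmp.append(f.pop())
--         if len (s) > 0:
--             tmp.append (s.pop ( ))
--         res.append (tmp)
--     return res
-- ===== SOURCE B (Python) =====
-- def make_pairlist_from_list(gl):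
--     res = []
--     n = len(gl)
--     while n >= 2:
--         if n % 2 == 0:
--             res.append([gl[n - 1], gl[n - 2]])
--         else:
--             res.append([gl[n - 2], gl[n - 1]])
--         n -= 2
--     if n == 1:
--         res.append([gl[0]])
--     return res
-- ===== Notes on version B (the rewrite author's own statement) =====
-- stated objective: simpler
-- what changed: B replaces A's two-phase scheme (split the list into two parity stacks, then repeatedly pop both) by a single backward index walk that emits each group [gl[n-2]/gl[n-1] ordered by the parity of n] directly, with no auxiliary lists.
import Mathlib
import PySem

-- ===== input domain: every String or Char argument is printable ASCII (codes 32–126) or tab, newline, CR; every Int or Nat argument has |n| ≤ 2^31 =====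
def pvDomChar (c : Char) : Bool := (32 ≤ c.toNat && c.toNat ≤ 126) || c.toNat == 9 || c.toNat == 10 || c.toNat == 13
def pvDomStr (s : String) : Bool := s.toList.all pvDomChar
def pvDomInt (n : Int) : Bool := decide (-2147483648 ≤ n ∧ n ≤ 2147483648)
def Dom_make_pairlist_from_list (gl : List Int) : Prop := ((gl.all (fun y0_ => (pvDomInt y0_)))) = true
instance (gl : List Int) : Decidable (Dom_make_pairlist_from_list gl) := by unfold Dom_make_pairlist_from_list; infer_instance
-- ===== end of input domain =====

-- B replaces A's split-into-two-stacks-then-pop scheme by a single backward index walk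
-- emitting each group directly (objective: simpler; same return value on every list).

-- ===== PORT A =====
-- the body of A's first 'for' loop over state (f, s, flag)
def pvStep (st : List Int × List Int × Int) (i : Int) : List Int × List Int × Int :=
  if st.2.2 ≠ 0 then (st.1 ++ [i], st.2.1, 0) else (st.1, st.2.1 ++ [i], 1)

-- the 'while True' pop loop; 'f.pop()' / 's.pop()' on a list guarded nonempty is exactly
-- (getLast!, dropLast) — exact here since each pop is guarded by 'len(...) > 0'
def pvALoop (f s : List Int) (res : List (List Int)) : List (List Int) :=
  if h : f.length + s.length ≤ 0 then res
  else
    let p1 : List Int × List Int :=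
      if f.length > 0 then (([] : List Int) ++ [f.getLast!], f.dropLast) else ([], f)
    let p2 : List Int × List Int :=
      if s.length > 0 then (p1.1 ++ [s.getLast!], s.dropLast) else (p1.1, s)
    pvALoop p1.2 p2.2 (res ++ [p2.1])
termination_by f.length + s.length
decreasing_by
  split_ifs with h1 h2 h2 <;> simp [List.length_dropLast] <;> omega

def make_pairlist_from_list (gl : List Int) : List (List Int) :=
  let st := gl.foldl pvStep (([] : List Int), ([] : List Int), (0 : Int))
  pvALoop st.1 st.2.1 []

-- ===== PORT B =====
-- Source B's 'while n >= 2' loop; n stays a valid index bound, the trailing 'if n == 1'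
def pvBLoop (gl : List Int) (n : Nat) (res : List (List Int)) : List (List Int) :=
  if n ≥ 2 then
    pvBLoop gl (n - 2)
      (res ++ [if n % 2 = 0 then
                 [PySem.List.pyGetD gl ((n : Int) - 1) 0, PySem.List.pyGetD gl ((n : Int) - 2) 0]
               else
                 [PySem.List.pyGetD gl ((n : Int) - 2) 0, PySem.List.pyGetD gl ((n : Int) - 1) 0]])
  else if n = 1 then res ++ [[PySem.List.pyGetD gl 0 0]] else res
termination_by n

def make_pairlist_from_list_alt (gl : List Int) : List (List Int) :=
  pvBLoop gl gl.length []

-- ===== PRECONDITION & SPEC =====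
def Spec_make_pairlist_from_list (gl : List Int) (out : List (List Int)) : Prop := out = make_pairlist_from_list_alt gl
instance (gl : List Int) (out : List (List Int)) : Decidable (Spec_make_pairlist_from_list gl out) := by unfold Spec_make_pairlist_from_list; infer_instance

-- ===== CLAIM (what is proved, stated in full; the proofs are below) =====
def Claim_equal_make_pairlist_from_list : Prop := ∀ (gl : List Int), Dom_make_pairlist_from_list gl → Spec_make_pairlist_from_list gl (make_pairlist_from_list gl)

-- ===== LEMMAS AND PROOFS =====

-- (evens, odds) of a list by index parity
def pvSp : List Int → List Int × List Int
  | [] => ([], [])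
  | x :: t => (x :: (pvSp t).2, (pvSp t).1)

-- zip-longest grouping of two lists
def pvG : List Int → List Int → List (List Int)
  | [], [] => []
  | a :: as, [] => [a] :: pvG as []
  | [], b :: bs => [b] :: pvG [] bs
  | a :: as, b :: bs => [a, b] :: pvG as bs
termination_by as bs => as.length + bs.length

theorem pvFold_eq (l : List Int) : ∀ (f s : List Int),
    (l.foldl pvStep (f, s, (0:Int))
      = (f ++ (pvSp l).2, s ++ (pvSp l).1, if l.length % 2 = 0 then (0:Int) else 1))
  ∧ (l.foldl pvStep (f, s, (1:Int))
      = (f ++ (pvSp l).1, s ++ (pvSp l).2, if l.length % 2 = 0 then (1:Int) else 0)) := by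
  induction l with
  | nil => intro f s; simp [pvSp]
  | cons x t ih =>
    intro f s
    constructor
    · rw [List.foldl_cons, show pvStep (f, s, (0:Int)) x = (f, s ++ [x], 1) from by simp [pvStep],
        (ih f (s ++ [x])).2]
      by_cases hp : t.length % 2 = 0 <;>
        simp [pvSp, hp, List.length_cons, Nat.add_mod] <;> omega
    · rw [List.foldl_cons, show pvStep (f, s, (1:Int)) x = (f ++ [x], s, 0) from by simp [pvStep],
        (ih (f ++ [x]) s).1]
      by_cases hp : t.length % 2 = 0 <;>
        simp [pvSp, hp, List.length_cons, Nat.add_mod] <;> omega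

theorem pvGetLastConcat (xs : List Int) (a : Int) : (xs ++ [a]).getLast! = a := by
  cases hx : xs ++ [a] with
  | nil => simp at hx
  | cons y t => simp [List.getLast!, ← hx]

theorem pvALoop_eq : ∀ (n : Nat) (fr sr : List Int) (res : List (List Int)),
    fr.length + sr.length ≤ n →
    pvALoop fr.reverse sr.reverse res = res ++ pvG fr sr := by
  intro n
  induction n with
  | zero =>
    intro fr sr res h
    have hf : fr = [] := by cases fr <;> simp_all
    have hs : sr = [] := by cases sr <;> simp_all
    subst hf; subst hs
    rw [pvALoop]; simp [pvG]
  | succ n ih =>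
    intro fr sr res h
    match fr, sr with
    | [], [] => rw [pvALoop]; simp [pvG]
    | a :: fr', [] =>
      rw [pvALoop]
      simp only [List.reverse_cons, List.reverse_nil]
      rw [dif_neg (by simp)]
      simp only [List.length_append, List.length_reverse, List.length_cons, List.length_nil]
      rw [if_pos (by omega), if_neg (by simp)]
      simp only [pvGetLastConcat, List.dropLast_concat]
      have := ih fr' [] (res ++ [[]  ++ [a]])
      simp only [List.reverse_nil] at this
      rw [this (by simp at h ⊢; omega)]
      simp [pvG]
    | [], b :: sr' =>
      rw [pvALoop]
      simp only [List.reverse_cons, List.reverse_nil]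
      rw [dif_neg (by simp)]
      rw [if_neg (by simp), if_pos (by simp)]
      simp only [pvGetLastConcat, List.dropLast_concat]
      have := ih [] sr' (res ++ [[] ++ [b]])
      simp only [List.reverse_nil] at this
      rw [this (by simp at h ⊢; omega)]
      simp [pvG]
    | a :: fr', b :: sr' =>
      rw [pvALoop]
      simp only [List.reverse_cons]
      rw [dif_neg (by simp)]
      rw [if_pos (by simp), if_pos (by simp)]
      simp only [pvGetLastConcat, List.dropLast_concat]
      rw [ih fr' sr' (res ++ [[] ++ [a] ++ [b]]) (by simp at h ⊢; omega)]
      simp [pvG]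

theorem pvSp_concat (l : List Int) (x : Int) :
    pvSp (l ++ [x]) = if l.length % 2 = 0
      then ((pvSp l).1 ++ [x], (pvSp l).2)
      else ((pvSp l).1, (pvSp l).2 ++ [x]) := by
  induction l with
  | nil => simp [pvSp]
  | cons y t ih =>
    by_cases hp : t.length % 2 = 0 <;>
      simp [pvSp, ih, hp, List.length_cons, Nat.add_mod] <;> omega

theorem pvBLoop_eq : ∀ (n : Nat) (gl : List Int) (res : List (List Int)),
    n ≤ gl.length →
    pvBLoop gl n res = res ++ pvG (pvSp (gl.take n)).2.reverse (pvSp (gl.take n)).1.reverse := by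
  intro n
  induction n using Nat.strong_induction_on with
  | _ n ih =>
    intro gl res h
    match n with
    | 0 => rw [pvBLoop]; simp [pvSp, pvG]
    | 1 =>
      rw [pvBLoop]
      match gl, h with
      | g0 :: t, _ =>
        simp [pvSp, pvG, PySem.List.pyGetD_zero_cons]
    | (m + 2) =>
      rw [pvBLoop]
      rw [if_pos (by omega)]
      have hm2 : m + 2 ≤ gl.length := h
      have hm : m < gl.length := by omega
      have hm1 : m + 1 < gl.length := by omega
      -- take (m+2) = take m ++ [gl[m], gl[m+1]]
      have htake : gl.take (m + 2) = gl.take m ++ [gl[m], gl[m+1]] := by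
        rw [List.take_add]
        have h2 : List.take 2 (List.drop m gl) = [gl[m], gl[m + 1]] := by
          apply List.ext_getElem (by simp; omega)
          intro i h1 h2
          have hi : i < 2 := by simpa using h2
          simp only [List.getElem_take, List.getElem_drop]
          interval_cases i <;> simp
        rw [h2]
      have hlen : (gl.take m).length = m := by simp; omega
      have hsp : pvSp (gl.take (m+2)) =
          if m % 2 = 0
          then (((pvSp (gl.take m)).1 ++ [gl[m]], (pvSp (gl.take m)).2 ++ [gl[m+1]]))
          else (((pvSp (gl.take m)).1 ++ [gl[m+1]], (pvSp (gl.take m)).2 ++ [gl[m]])) := by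
        rw [htake, show gl.take m ++ [gl[m], gl[m+1]] = (gl.take m ++ [gl[m]]) ++ [gl[m+1]] from by
          rw [List.append_assoc]; rfl]
        rw [pvSp_concat, pvSp_concat]
        by_cases hp : m % 2 = 0 <;>
          simp [hlen, hp, List.length_append, Nat.add_mod] <;> omega
      have hg1 : PySem.List.pyGetD gl ((m : Int) + 2 - 1) 0 = gl[m+1] := by
        rw [show ((m : Int) + 2 - 1) = ((m + 1 : Nat) : Int) from by push_cast; ring,
          PySem.List.pyGetD_natCast]
        simp [List.getD, List.getElem?_eq_getElem hm1]
      have hg0 : PySem.List.pyGetD gl ((m : Int) + 2 - 2) 0 = gl[m] := by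
        rw [show ((m : Int) + 2 - 2) = ((m : Nat) : Int) from by push_cast; ring,
          PySem.List.pyGetD_natCast]
        simp [List.getD, List.getElem?_eq_getElem hm]
      rw [show m + 2 - 2 = m from by omega, ih m (by omega) gl _ (by omega)]
      by_cases hp : m % 2 = 0
      · rw [if_pos (by push_cast; omega), hsp, if_pos hp]
        push_cast
        rw [hg1, hg0]
        simp [pvG]
      · rw [if_neg (by push_cast; omega), hsp, if_neg hp]
        push_cast
        rw [hg1, hg0]
        simp [pvG]

-- ===== VERDICT (by name: the statement is the Claim_ definition above) =====
theorem make_pairlist_from_list_spec : Claim_equal_make_pairlist_from_list := by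
  intro gl _
  unfold Spec_make_pairlist_from_list make_pairlist_from_list make_pairlist_from_list_alt
  rw [(pvFold_eq gl [] []).1]
  simp only [List.nil_append]
  have hA := pvALoop_eq ((pvSp gl).2.reverse.length + (pvSp gl).1.reverse.length)
    (pvSp gl).2.reverse (pvSp gl).1.reverse [] (le_refl _)
  simp only [List.reverse_reverse, List.nil_append] at hA
  rw [hA, pvBLoop_eq gl.length gl [] (le_refl _)]
  simp [List.take_length]
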